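-- pv_equiv track=rewrite | github.com/zen006598/flow_doc_gener | src/utils/compress_content.py | compress_content
-- ===== SOURCE A (Python) =====
-- def compress_content(content):
--     lines = content.split('\n')
--     stripped_lines = [line.strip() for line in lines if line.strip()]  # Remove empty lines
--
--     # Merge single character lines with next line
--     compressed_lines = []
--     i = 0
--     while i < len(stripped_lines):
--         current_line = stripped_lines[i]
--         if len(current_line) == 1 and i + 1 < len(stripped_lines):
--             # Merge single character with next line
--             next_line = stripped_lines[i + 1]
--             compressed_lines.append(current_line + '' + next_line)
--             i += 2
--         else:
--             compressed_lines.append(current_line)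
--             i += 1
--
--     return '\n'.join(compressed_lines)
-- ===== SOURCE B (Python) =====
-- def compress_content(content):
--     out = []
--     pending = None
--     for raw in content.split('\n'):
--         line = raw.strip()
--         if not line:
--             continue
--         if pending is not None:
--             out.append(pending + line)
--             pending = None
--         elif len(line) == 1:
--             pending = line
--         else:
--             out.append(line)
--     if pending is not None:
--         out.append(pending)
--     return '\n'.join(out)
-- ===== Notes on version B (the rewrite author's own statement) =====
-- stated objective: simpler
-- what changed: Replaced A's staged pipeline (build stripped_lines list, then an index-jumping while loop with i+=1/i+=2 lookahead) by one fused single pass over the raw split lines that strips, skips empties and carries the last unmerged single-char line as a pending state variable, flushing it onto the next non-empty line.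
import Mathlib
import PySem

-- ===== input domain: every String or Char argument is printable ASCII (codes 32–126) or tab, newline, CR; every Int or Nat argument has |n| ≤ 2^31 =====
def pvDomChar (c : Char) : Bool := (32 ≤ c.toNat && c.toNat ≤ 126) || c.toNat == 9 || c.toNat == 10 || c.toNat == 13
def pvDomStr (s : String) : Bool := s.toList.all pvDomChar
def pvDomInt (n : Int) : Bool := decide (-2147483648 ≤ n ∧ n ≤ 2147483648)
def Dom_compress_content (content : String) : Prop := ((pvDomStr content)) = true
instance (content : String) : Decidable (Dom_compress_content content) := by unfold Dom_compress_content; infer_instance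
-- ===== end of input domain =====

-- B fuses A's two stages (strip/filter list, then index-jumping while loop) into one pass over
-- the raw split lines carrying a pending single-char line as state (objective: simpler).

-- ===== PORT A =====
-- A's while loop over index i: each step consumes two lines (merge) or one; ported as
-- structural recursion on the remaining suffix of stripped_lines (exactly A's i-jumps).
def ccLoopA : List String → List String
  | [] => []
  | [x] => [x]
  | x :: y :: rest =>
    if PySem.Str.len x == 1 then (x ++ y) :: ccLoopA rest
    else x :: ccLoopA (y :: rest)

def compress_content (content : String) : String :=
  let lines := (PySem.Str.split? content "\n").getD []
  let stripped_lines := (lines.map PySem.Str.strip).filter (fun l => l ≠ "")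
  PySem.Str.join "\n" (ccLoopA stripped_lines)

-- ===== PORT B =====
-- B's single fused for-loop: strip, skip empties, pending-state merge; ported as a foldl over
-- the raw lines with state (out, pending).
def ccStep (st : List String × Option String) (raw : String) : List String × Option String :=
  let line := PySem.Str.strip raw
  if line = "" then st
  else
    match st.2 with
    | some p => (st.1 ++ [p ++ line], none)
    | none =>
      if PySem.Str.len line == 1 then (st.1, some line)
      else (st.1 ++ [line], none)

def compress_content_alt (content : String) : String :=
  let fin := ((PySem.Str.split? content "\n").getD []).foldl ccStep ([], none)
  let out := match fin.2 with | some p => fin.1 ++ [p] | none => fin.1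
  PySem.Str.join "\n" out

-- ===== PRECONDITION & SPEC =====
def Spec_compress_content (content : String) (out : String) : Prop := out = compress_content_alt content
instance (content : String) (out : String) : Decidable (Spec_compress_content content out) := by unfold Spec_compress_content; infer_instance

-- ===== CLAIM (what is proved, stated in full; the proofs are below) =====
def Claim_equal_compress_content : Prop := ∀ (content : String), Dom_compress_content content → Spec_compress_content content (compress_content content)

-- ===== LEMMAS AND PROOFS =====

-- Proof-side machine: B's pending-state pass on the already-stripped list.
def ccMach : Option String → List String → List String
  | some p, [] => [p]
  | none, [] => []
  | some p, x :: rest => (p ++ x) :: ccMach none rest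
  | none, x :: rest =>
    if PySem.Str.len x == 1 then ccMach (some x) rest
    else x :: ccMach none rest

def ccFin (st : List String × Option String) : List String :=
  match st.2 with | some p => st.1 ++ [p] | none => st.1

theorem ccFoldl_eq_ccMach (lines : List String) :
    ∀ (acc : List String) (p : Option String),
      ccFin (lines.foldl ccStep (acc, p)) =
        acc ++ ccMach p ((lines.map PySem.Str.strip).filter (fun l => l ≠ "")) := by
  induction lines with
  | nil =>
      intro acc p
      cases p <;> simp [ccFin, ccMach]
  | cons raw rest ih =>
      intro acc p
      simp only [List.foldl_cons, List.map_cons, List.filter_cons]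
      by_cases h : PySem.Str.strip raw = ""
      · simp [ccStep, h, ih]
      · cases p with
        | some q =>
            simp [ccStep, h, ccMach, ih, List.append_assoc]
        | none =>
            by_cases h1 : (PySem.Chars.strip raw.toList).length = 1
            · simp [ccStep, PySem.Str.len, h, h1, ccMach, ih]
            · simp [ccStep, PySem.Str.len, h, h1, ccMach, ih, List.append_assoc]

theorem ccMach_none_eq_ccLoopA (xs : List String) : ccMach none xs = ccLoopA xs := by
  induction xs using ccLoopA.induct with
  | case1 => rfl
  | case2 x => show ccMach none [x] = _; unfold ccMach; split <;> rfl
  | case3 x y rest h ih =>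
      show ccMach none (x :: y :: rest) = _
      rw [ccLoopA, if_pos h]
      unfold ccMach
      rw [if_pos h]
      unfold ccMach
      rw [ih]
  | case4 x y rest h ih =>
      show ccMach none (x :: y :: rest) = _
      rw [ccLoopA, if_neg h]
      unfold ccMach
      rw [if_neg h, ih]

-- ===== VERDICT (by name: the statement is the Claim_ definition above) =====
theorem compress_content_spec : Claim_equal_compress_content := by
  intro content _
  unfold Spec_compress_content compress_content compress_content_alt
  have h := ccFoldl_eq_ccMach ((PySem.Str.split? content "\n").getD []) [] none
  simp only [List.nil_append, ccFin] at h
  dsimp only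
  rw [h, ccMach_none_eq_ccLoopA]
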